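-- pv_equiv track=rewrite | github.com/Thomas55555/local_roborock_server | src/roborock_local_server/bundled_backend/https_server/endpoint_rules.py | _split_param_values
-- ===== SOURCE A (Python) =====
-- from typing import Any, Callable, Sequence
--
-- def _split_param_values(values: Sequence[str]) -> list[str]:
--     split_values: list[str] = []
--     for value in values:
--         for part in str(value or "").split(","):
--             candidate = part.strip()
--             if candidate:
--                 split_values.append(candidate)
--     return split_values
-- ===== SOURCE B (Python) =====
-- def _split_param_values(values):
--     out = []
--     for value in values:
--         word = []        # current token, never ends in whitespace
--         pending = []     # whitespace seen after word, kept only if more text follows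
--         for ch in str(value or "") + ",":
--             if ch == ",":
--                 if word:
--                     out.append("".join(word))
--                 word = []
--                 pending = []
--             elif ch.isspace():
--                 if word:
--                     pending.append(ch)
--             else:
--                 if word:
--                     word.extend(pending)
--                 word.append(ch)
--                 pending = []
--     return out
-- ===== Notes on version B (the rewrite author's own statement) =====
-- stated objective: alternative
-- what changed: Replaces the library split/strip/filter pipeline by a hand-written character-level state machine: one scan per value (with a sentinel comma) maintaining a current word and a pending-whitespace buffer, which emits already-stripped nonempty tokens directly, never calling split or strip.
import Mathlib
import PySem

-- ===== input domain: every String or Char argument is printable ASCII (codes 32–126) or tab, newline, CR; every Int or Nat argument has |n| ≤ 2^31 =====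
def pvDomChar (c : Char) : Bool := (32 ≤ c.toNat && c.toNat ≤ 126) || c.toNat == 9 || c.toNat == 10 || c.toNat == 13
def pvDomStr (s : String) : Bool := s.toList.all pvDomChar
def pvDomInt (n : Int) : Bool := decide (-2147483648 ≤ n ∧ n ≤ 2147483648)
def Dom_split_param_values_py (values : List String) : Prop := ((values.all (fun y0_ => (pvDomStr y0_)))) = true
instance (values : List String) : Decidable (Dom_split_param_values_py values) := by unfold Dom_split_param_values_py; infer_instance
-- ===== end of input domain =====

-- B replaces A's library split/strip/filter pipeline by a hand-written character-level
-- state machine that emits stripped nonempty tokens directly (alternative, same cost).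


-- ===== PORT A =====
def split_param_values_py (values : List String) : List String :=
  values.foldl (fun split_values value =>
    ((PySem.Str.split? (if value == "" then "" else value) ",").getD []).foldl
      (fun acc part =>
        let candidate := PySem.Str.strip part
        if candidate ≠ "" then acc ++ [candidate] else acc)
      split_values) []

-- ===== PORT B =====
-- the inner character loop of Source B: state (word, pending, out)
def scanB : List Char → List Char → List Char → List String → List String
  | [], _, _, out => out
  | c :: rest, word, pending, out =>
    if c = ',' then
      scanB rest [] [] (out ++ if word = [] then [] else [String.ofList word])
    else if PySem.Chars.isspace c then
      scanB rest word (if word = [] then pending else pending ++ [c]) out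
    else
      scanB rest ((if word = [] then word else word ++ pending) ++ [c]) [] out

def split_param_values_py_alt (values : List String) : List String :=
  values.foldl (fun out value =>
    scanB ((if value == "" then "" else value).toList ++ [',']) [] [] out) []

-- ===== PRECONDITION & SPEC =====
def Spec_split_param_values_py (values : List String) (out : List String) : Prop := out = split_param_values_py_alt values
instance (values : List String) (out : List String) : Decidable (Spec_split_param_values_py values out) := by unfold Spec_split_param_values_py; infer_instance

-- ===== CLAIM =====
def Claim_equal_split_param_values_py : Prop := ∀ (values : List String), Dom_split_param_values_py values → Spec_split_param_values_py values (split_param_values_py values)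

-- ===== LEMMAS AND PROOFS =====

-- `str(v or "")` on a string argument is the string itself
theorem ifEmpty (v : String) : (if v == "" then "" else v) = v := by
  by_cases h : v = "" <;> simp [h]

-- a simple forward recursion computing Python's s.split(",")
def mySplit : List Char → List (List Char)
  | [] => [[]]
  | c :: rest => if c = ',' then [] :: mySplit rest else (mySplit rest).modifyHead (c :: ·)

theorem mySplit_ne_nil (l : List Char) : mySplit l ≠ [] := by
  induction l with
  | nil => simp [mySplit]
  | cons c rest ih =>
    simp only [mySplit]
    split
    · simp
    · cases h : mySplit rest with
      | nil => exact absurd h ih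
      | cons a t => simp

theorem go_eq (fuel : Nat) (l cur : List Char) (acc : List (List Char))
    (h : l.length < fuel) :
    PySem.Chars.splitOn.go [','] fuel l cur acc
      = acc.reverse ++ (mySplit l).modifyHead (cur.reverse ++ ·) := by
  induction fuel generalizing l cur acc with
  | zero => omega
  | succ fuel ih =>
    cases l with
    | nil => simp [PySem.Chars.splitOn.go, mySplit]
    | cons c rest =>
      by_cases hc : c = ','
      · subst hc
        have hpre : List.isPrefixOf [','] (',' :: rest) = true := by
          simp [List.isPrefixOf]
        rw [PySem.Chars.splitOn.go]
        simp only [hpre, if_pos]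
        rw [ih _ _ _ (by simpa using Nat.lt_of_succ_lt_succ h)]
        have : List.modifyHead (fun x => x) (mySplit rest) = mySplit rest := by
          cases hm : mySplit rest with
          | nil => rfl
          | cons a t => simp [List.modifyHead]
        simp [mySplit, this]
      · have hpre : List.isPrefixOf [','] (c :: rest) = false := by
          simp [List.isPrefixOf]
          exact fun e => hc e.symm
        rw [PySem.Chars.splitOn.go]
        simp only [hpre, Bool.false_eq_true, if_neg, not_false_eq_true]
        rw [ih _ _ _ (by simpa using Nat.lt_of_succ_lt_succ h)]
        simp only [mySplit, hc, if_neg, not_false_eq_true]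
        cases hm : mySplit rest with
        | nil => exact absurd hm (mySplit_ne_nil rest)
        | cons a t => simp [List.modifyHead]

theorem splitOn_comma (l : List Char) : PySem.Chars.splitOn l [','] = mySplit l := by
  unfold PySem.Chars.splitOn
  rw [go_eq _ _ _ _ (Nat.lt_succ_self _)]
  cases h : mySplit l with
  | nil => exact absurd h (mySplit_ne_nil l)
  | cons a t => simp [List.modifyHead]

-- what one value of A contributes
def pieces (v : String) : List String :=
  (((mySplit v.toList).map (fun p => PySem.Str.strip (String.ofList p))).filter
    (fun p => p ≠ ""))

theorem map_strip_filter (l : List String) :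
    (l.filter (fun p => PySem.Str.strip p ≠ "")).map PySem.Str.strip
      = (l.map PySem.Str.strip).filter (fun p => p ≠ "") := by
  induction l with
  | nil => rfl
  | cons x xs ih =>
    by_cases h : PySem.Str.strip x = ""
    · simpa [List.filter_cons, h] using ih
    · simp only [List.filter_cons, List.map_cons, h, decide_not]
      simpa [h] using ih

theorem getD_split? (s : String) :
    (PySem.Str.split? s ",").getD [] = (mySplit s.toList).map String.ofList := by
  simp [PySem.Str.split?, PySem.Chars.split?, splitOn_comma]

theorem A_eq (values : List String) :
    split_param_values_py values = values.flatMap pieces := by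
  unfold split_param_values_py
  simp only [ifEmpty, getD_split?]
  have inner : ∀ (v : String) (acc : List String),
      ((mySplit v.toList).map String.ofList).foldl
        (fun acc part =>
          let candidate := PySem.Str.strip part
          if candidate ≠ "" then acc ++ [candidate] else acc)
        acc = acc ++ pieces v := by
    intro v acc
    have fun_eq : (fun (acc : List String) part =>
        let candidate := PySem.Str.strip part
        if candidate ≠ "" then acc ++ [candidate] else acc)
        = (fun acc part => if (fun part => decide (PySem.Str.strip part ≠ "")) part = true
            then acc ++ [PySem.Str.strip part] else acc) := by
      funext acc part; simp
    rw [fun_eq, PySem.List.foldl_append_if (fun part => decide (PySem.Str.strip part ≠ ""))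
      PySem.Str.strip]
    rw [map_strip_filter]
    simp [pieces, List.filter_map, List.map_map, Function.comp_def]
  have hfun : (fun (acc : List String) v => ((mySplit v.toList).map String.ofList).foldl
        (fun acc part =>
          let candidate := PySem.Str.strip part
          if candidate ≠ "" then acc ++ [candidate] else acc) acc)
      = (fun acc v => acc ++ pieces v) := by
    funext acc v; exact inner v acc
  rw [hfun, PySem.List.foldl_append_eq_flatMap]
  simp

-- ---- B side ----

-- helper notions for the scanner invariant
def flushS (w : List Char) : List String := if w = [] then [] else [String.ofList w]

def piecesC (t : List (List Char)) : List String :=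
  ((t.map (fun p => String.ofList (PySem.Chars.strip p))).filter (fun p => p ≠ ""))

theorem flushS_strip (h : List Char) :
    flushS (PySem.Chars.strip h)
      = (if String.ofList (PySem.Chars.strip h) ≠ "" then [String.ofList (PySem.Chars.strip h)] else []) := by
  by_cases hs : PySem.Chars.strip h = []
  · simp [flushS, hs]
  · simp [flushS, hs]

theorem piecesC_cons (h : List Char) (t : List (List Char)) :
    piecesC (h :: t) = flushS (PySem.Chars.strip h) ++ piecesC t := by
  rw [flushS_strip]
  by_cases hs : String.ofList (PySem.Chars.strip h) = "" <;>
    simp [piecesC, hs]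

theorem dropWhile_append_all (pr : Char → Bool) (xs ys : List Char)
    (h : ∀ c ∈ xs, pr c = true) :
    List.dropWhile pr (xs ++ ys) = List.dropWhile pr ys := by
  induction xs with
  | nil => rfl
  | cons c rest ih =>
    simp only [List.cons_append, List.dropWhile_cons, h c (by simp)]
    exact ih (fun d hd => h d (by simp [hd]))

theorem rstrip_append_ws (w p : List Char) (hp : ∀ c ∈ p, PySem.Chars.isspace c = true) :
    PySem.Chars.rstrip (w ++ p) = PySem.Chars.rstrip w := by
  unfold PySem.Chars.rstrip
  rw [List.reverse_append]
  congr 1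
  exact dropWhile_append_all _ _ _ (fun c hc => hp c (by simpa using hc))

theorem rstrip_no_ws_end (w' : List Char) (c : Char) (hc : PySem.Chars.isspace c = false) :
    PySem.Chars.rstrip (w' ++ [c]) = w' ++ [c] := by
  unfold PySem.Chars.rstrip
  simp [hc]

theorem strip_cons_ws (c : Char) (h : List Char) (hc : PySem.Chars.isspace c = true) :
    PySem.Chars.strip (c :: h) = PySem.Chars.strip h := by
  simp [PySem.Chars.strip, PySem.Chars.lstrip, hc]

theorem strip_cons_nows (c : Char) (h : List Char) (hc : PySem.Chars.isspace c = false) :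
    PySem.Chars.strip (c :: h) = PySem.Chars.rstrip (c :: h) := by
  simp [PySem.Chars.strip, PySem.Chars.lstrip, hc]

-- the token the scanner will flush at the next comma, given state (w, p) and remaining piece h
def tokF (w p h : List Char) : List Char :=
  if w = [] then PySem.Chars.strip h else PySem.Chars.rstrip (w ++ p ++ h)

theorem scanB_master (l : List Char) : ∀ (w p : List Char) (out : List String),
    (w = [] → p = []) →
    (∀ c ∈ p, PySem.Chars.isspace c = true) →
    (w ≠ [] → ∃ w' c, w = w' ++ [c] ∧ PySem.Chars.isspace c = false) →
    scanB (l ++ [',']) w p out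
      = out ++ flushS (tokF w p (mySplit l).headI) ++ piecesC (mySplit l).tail := by
  induction l with
  | nil =>
    intro w p out hwp hp hw
    by_cases hwe : w = []
    · subst hwe
      simp [scanB, mySplit, tokF, flushS, piecesC, PySem.Chars.strip,
        PySem.Chars.lstrip, PySem.Chars.rstrip]
    · obtain ⟨w', c, rfl, hc⟩ := hw hwe
      have : tokF (w' ++ [c]) p [] = w' ++ [c] := by
        unfold tokF
        rw [if_neg hwe]
        rw [List.append_nil, rstrip_append_ws _ _ hp, rstrip_no_ws_end _ _ hc]
      simp [scanB, mySplit, this, flushS, piecesC, hwe]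
  | cons c rest ih =>
    intro w p out hwp hp hw
    obtain ⟨h', t', hm⟩ : ∃ h' t', mySplit rest = h' :: t' := by
      cases hsp : mySplit rest with
      | nil => exact absurd hsp (mySplit_ne_nil rest)
      | cons a t => exact ⟨a, t, rfl⟩
    by_cases hc : c = ','
    · subst hc
      have lhs : scanB ((',' :: rest) ++ [',']) w p out
          = scanB (rest ++ [',']) [] [] (out ++ flushS w) := by
        simp [scanB, flushS]
      rw [lhs, ih [] [] _ (fun _ => rfl) (by simp) (by simp)]
      have hmy : mySplit (',' :: rest) = [] :: mySplit rest := by simp [mySplit]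
      rw [hmy]
      simp only [List.headI, List.tail, hm, piecesC_cons]
      have htok : tokF w p [] = w := by
        unfold tokF
        by_cases hwe : w = []
        · simp [hwe, PySem.Chars.strip, PySem.Chars.lstrip, PySem.Chars.rstrip]
        · obtain ⟨w', d, rfl, hd⟩ := hw hwe
          rw [if_neg hwe, List.append_nil, rstrip_append_ws _ _ hp, rstrip_no_ws_end _ _ hd]
      rw [htok]
      simp [tokF, List.append_assoc]
    · have hmy : mySplit (c :: rest) = (c :: h') :: t' := by
        simp [mySplit, hc, hm, List.modifyHead]
      rw [hmy]
      simp only [List.headI, List.tail]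
      by_cases hs : PySem.Chars.isspace c = true
      · have lhs : scanB ((c :: rest) ++ [',']) w p out
            = scanB (rest ++ [',']) w (if w = [] then p else p ++ [c]) out := by
          simp [scanB, hc, hs]
        rw [lhs]
        by_cases hwe : w = []
        · rw [if_pos hwe]
          rw [ih w p out hwp hp hw, hm]
          simp only [List.headI, List.tail]
          have : tokF w p (c :: h') = tokF w p h' := by
            unfold tokF
            rw [if_pos hwe, if_pos hwe, strip_cons_ws _ _ hs]
          rw [this]
        · rw [if_neg hwe]
          rw [ih w (p ++ [c]) out (fun h => absurd h hwe)
            (by intro d hd; rcases List.mem_append.mp hd with h | h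
                · exact hp d h
                · simp at h; subst h; exact hs) hw, hm]
          simp only [List.headI, List.tail]
          have : tokF w (p ++ [c]) h' = tokF w p (c :: h') := by
            unfold tokF
            rw [if_neg hwe, if_neg hwe]
            congr 1
            simp
          rw [this]
      · have hsf : PySem.Chars.isspace c = false := by simpa using hs
        have lhs : scanB ((c :: rest) ++ [',']) w p out
            = scanB (rest ++ [',']) ((if w = [] then w else w ++ p) ++ [c]) [] out := by
          simp [scanB, hc, hsf]
        rw [lhs]
        rw [ih _ [] out (by simp) (by simp)
          (fun _ => ⟨(if w = [] then w else w ++ p), c, rfl, hsf⟩), hm]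
        simp only [List.headI, List.tail]
        have : tokF ((if w = [] then w else w ++ p) ++ [c]) [] h' = tokF w p (c :: h') := by
          unfold tokF
          rw [if_neg (by simp)]
          by_cases hwe : w = []
          · rw [if_pos hwe, hwe]
            rw [strip_cons_nows _ _ hsf]
            simp
          · rw [if_neg hwe, if_neg hwe]
            congr 1
            simp
        rw [this]

theorem pieces_eq_piecesC (v : String) : pieces v = piecesC (mySplit v.toList) := by
  unfold pieces piecesC
  congr 1
  apply List.map_congr_left
  intro p _
  simp [PySem.Str.strip]

theorem B_eq (values : List String) :
    split_param_values_py_alt values = values.flatMap pieces := by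
  unfold split_param_values_py_alt
  have hval : ∀ (out : List String) (v : String),
      scanB ((if v == "" then "" else v).toList ++ [',']) [] [] out = out ++ pieces v := by
    intro out v
    rw [ifEmpty]
    rw [scanB_master v.toList [] [] out (fun _ => rfl) (by simp) (by simp)]
    rw [pieces_eq_piecesC]
    obtain ⟨h', t', hm⟩ : ∃ h' t', mySplit v.toList = h' :: t' := by
      cases hsp : mySplit v.toList with
      | nil => exact absurd hsp (mySplit_ne_nil _)
      | cons a t => exact ⟨a, t, rfl⟩
    rw [hm]
    simp [piecesC_cons, tokF, List.append_assoc]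
  have hfun : (fun (out : List String) value =>
      scanB ((if value == "" then "" else value).toList ++ [',']) [] [] out)
      = (fun out v => out ++ pieces v) := by
    funext out v; exact hval out v
  rw [hfun, PySem.List.foldl_append_eq_flatMap]
  simp

-- ===== VERDICT =====
theorem split_param_values_py_spec : Claim_equal_split_param_values_py := by
  intro values _
  unfold Spec_split_param_values_py
  rw [A_eq, B_eq]
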